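-- pv_equiv track=rewrite | github.com/gdennen0/EchoZero | ui/qt_gui/block_panels/editor_panel.py | _get_update_description
-- ===== SOURCE A (Python) =====
-- def _get_update_description(updates: list) -> str:
--     """Get a descriptive name for the update operation."""
--     count = len(updates)
--
--     # Check what type of changes were made
--     has_duration = any('duration' in u for u in updates)
--     has_time = any('time' in u for u in updates)
--     has_classification = any('classification' in u for u in updates)
--
--     if has_duration and not has_time:
--         action = "Resize"
--     elif has_classification:
--         action = "Move"  # Layer change
--     else:
--         action = "Move"
--
--     if count == 1:
--         return f"{action} Event"
--     else:
--         return f"{action} {count} Events"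
-- ===== SOURCE B (Python) =====
-- def _get_update_description(updates: list) -> str:
--     """Early-exit decision scan: a 'time' key anywhere forces "Move" immediately
--     (it vetoes "Resize" regardless of anything else), so we stop scanning at the
--     first 'time'; otherwise we remember whether a 'duration' key was seen and
--     decide only at the end. Classification is irrelevant to the label."""
--     action = None
--     seen_duration = False
--     for u in updates:
--         if 'time' in u:
--             action = "Move"
--             break
--         if 'duration' in u:
--             seen_duration = True
--     if action is None:
--         action = "Resize" if seen_duration else "Move"
--     n = len(updates)
--     return f"{action} Event" if n == 1 else f"{action} {n} Events"
-- ===== Notes on version B (the rewrite author's own statement) =====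
-- stated objective: alternative
-- what changed: Replaces A's three independent full any() scans and redundant classification branch with a single early-exit decision scan that returns 'Move' the moment a 'time' key is found (since 'time' vetoes 'Resize' unconditionally) and otherwise tracks only whether 'duration' was seen.
import Mathlib
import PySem

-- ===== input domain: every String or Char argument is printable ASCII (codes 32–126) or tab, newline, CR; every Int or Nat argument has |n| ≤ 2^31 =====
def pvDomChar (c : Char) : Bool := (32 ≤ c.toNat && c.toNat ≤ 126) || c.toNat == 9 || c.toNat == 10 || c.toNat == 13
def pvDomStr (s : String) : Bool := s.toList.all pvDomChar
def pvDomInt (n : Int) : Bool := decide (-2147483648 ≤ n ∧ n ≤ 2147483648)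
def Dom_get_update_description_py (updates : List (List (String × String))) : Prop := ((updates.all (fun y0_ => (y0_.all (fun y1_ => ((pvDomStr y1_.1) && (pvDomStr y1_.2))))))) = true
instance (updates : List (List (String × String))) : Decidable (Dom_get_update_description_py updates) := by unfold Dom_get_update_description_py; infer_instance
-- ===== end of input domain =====

-- ===== PORT A =====
-- B replaces A's three full any() scans (and the redundant classification branch) by one
-- early-exit decision scan that stops at the first 'time' key (alternative decomposition).
def get_update_description_py (updates : List (List (String × String))) : String :=
  let count : Int := updates.length
  let has_duration := updates.any (fun u => u.any (fun kv => kv.1 == "duration"))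
  let has_time := updates.any (fun u => u.any (fun kv => kv.1 == "time"))
  let has_classification := updates.any (fun u => u.any (fun kv => kv.1 == "classification"))
  let action :=
    if has_duration && !has_time then "Resize"
    else if has_classification then "Move"
    else "Move"
  if count == 1 then action ++ " Event"
  else action ++ " " ++ PySem.Int.toStr count ++ " Events"

-- ===== PORT B =====
-- early-exit scan: return "Move" at the first mapping containing 'time'; else track 'duration'
def pvActionScan : List (List (String × String)) → Bool → String
  | [], seenDur => if seenDur then "Resize" else "Move"
  | u :: rest, seenDur =>
    if u.any (fun kv => kv.1 == "time") then "Move"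
    else pvActionScan rest (seenDur || u.any (fun kv => kv.1 == "duration"))

def get_update_description_py_alt (updates : List (List (String × String))) : String :=
  let action := pvActionScan updates false
  let n : Int := updates.length
  if n == 1 then action ++ " Event"
  else action ++ " " ++ PySem.Int.toStr n ++ " Events"

-- ===== PRECONDITION & SPEC =====
def Spec_get_update_description_py (updates : List (List (String × String))) (out : String) : Prop := out = get_update_description_py_alt updates
instance (updates : List (List (String × String))) (out : String) : Decidable (Spec_get_update_description_py updates out) := by unfold Spec_get_update_description_py; infer_instance

-- ===== CLAIM (what is proved, stated in full; the proofs are below) =====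
def Claim_equal_get_update_description_py : Prop := ∀ (updates : List (List (String × String))), Dom_get_update_description_py updates → Spec_get_update_description_py updates (get_update_description_py updates)

-- ===== LEMMAS AND PROOFS =====

lemma pvActionScan_eq (l : List (List (String × String))) (s : Bool) :
    pvActionScan l s =
      if (s || l.any (fun u => u.any (fun kv => kv.1 == "duration")))
          && !(l.any (fun u => u.any (fun kv => kv.1 == "time"))) then "Resize" else "Move" := by
  induction l generalizing s with
  | nil => simp [pvActionScan]
  | cons h t ih =>
    simp only [pvActionScan, List.any_cons, ih]
    by_cases ht : (h.any (fun kv => kv.1 == "time")) = true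
    · simp [ht]
    · simp only [Bool.not_eq_true] at ht
      simp [ht]
      congr 1
      simp [Bool.or_assoc]
      intro _ _ a b hab
      have := List.any_eq_false.mp ht (a, b) hab
      simpa using this

-- ===== VERDICT (by name: the statement is the Claim_ definition above) =====
theorem get_update_description_py_spec : Claim_equal_get_update_description_py := by
  intro updates _
  unfold Spec_get_update_description_py get_update_description_py get_update_description_py_alt
  rw [pvActionScan_eq]
  simp only [Bool.false_or]
  split_ifs <;> rfl
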